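-- pv_equiv track=rewrite | github.com/ormastes/simple | scripts/bootstrap/gen_c.py | _find_close_quote
-- ===== SOURCE A (Python) =====
-- def _find_close_quote(text, start):
--     """Find the matching close quote starting from position start (which is the opening quote).
--     Properly handles escaped characters including \\\\ (escaped backslash)."""
--     i = start + 1
--     while i < len(text):
--         if text[i] == '\\':
--             # Skip the escaped character (handles \\, \", \n, etc.)
--             i += 2
--             continue
--         if text[i] == '"':
--             return i
--         i += 1
--     return -1
-- ===== SOURCE B (Python) =====
-- def _find_close_quote(text, start):
--     """Find the matching close quote starting from position start (which is the opening quote).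
--     Candidate-first strategy: scan only for quote characters; for each quote found, decide
--     whether it is escaped by counting the run of backslashes immediately before it
--     (bounded below by start+1) -- the quote is the closer iff that run has even length."""
--     for j in range(start + 1, len(text)):
--         if text[j] == '"':
--             cnt = 0
--             k = j - 1
--             while k >= start + 1 and text[k] == '\\':
--                 cnt += 1
--                 k -= 1
--             if cnt % 2 == 0:
--                 return j
--     return -1
-- ===== Notes on version B (the rewrite author's own statement) =====
-- stated objective: alternative
-- what changed: Instead of a forward scan that maintains escape state by jumping the cursor past escaped characters, B scans only for quote candidates and decides escapedness per candidate by a backward count of the immediately preceding backslash run (closer iff the run length is even), carrying no forward state.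
import Mathlib
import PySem

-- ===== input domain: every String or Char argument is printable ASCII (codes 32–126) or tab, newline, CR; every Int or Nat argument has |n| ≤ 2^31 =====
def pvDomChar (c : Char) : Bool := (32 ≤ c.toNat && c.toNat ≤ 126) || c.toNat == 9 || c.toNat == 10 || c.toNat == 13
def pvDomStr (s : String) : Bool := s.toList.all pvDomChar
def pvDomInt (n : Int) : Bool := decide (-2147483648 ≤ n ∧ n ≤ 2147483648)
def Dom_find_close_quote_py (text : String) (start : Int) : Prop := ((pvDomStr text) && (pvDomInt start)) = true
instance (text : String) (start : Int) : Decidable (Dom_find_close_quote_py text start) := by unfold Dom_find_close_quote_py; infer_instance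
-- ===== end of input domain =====

-- B replaces A's stateful forward scan (cursor jumped past escaped characters) by a
-- candidate-first search: it looks only at quote characters and decides escapedness of
-- each candidate by a backward count of the preceding backslash run (closer iff even).

-- ===== PORT A =====
-- while loop of A: i moves by +2 after a backslash, else +1; text[i] via pyGet?
-- (the `none` branch, Python's IndexError, is excluded by Pre_; -2 is unreachable there)
def findCloseA (cs : List Char) (i : Int) : Int :=
  if _h : i < (cs.length : Int) then
    match PySem.List.pyGet? cs i with
    | none => -2
    | some c =>
      if c = '\\' then findCloseA cs (i + 2)
      else if c = '"' then i
      else findCloseA cs (i + 1)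
  else -1
termination_by ((cs.length : Int) - i).toNat
decreasing_by all_goals omega

def find_close_quote_py (text : String) (start : Int) : Int :=
  findCloseA text.toList (start + 1)

-- ===== PORT B =====
-- the inner while loop of B: count of consecutive backslashes at k, k-1, … down to lo
def runB (cs : List Char) (lo : Int) (k : Int) : Nat :=
  if h : lo ≤ k ∧ PySem.List.pyGet? cs k = some '\\' then runB cs lo (k - 1) + 1 else 0
termination_by (k - lo + 1).toNat
decreasing_by omega

-- the for-loop of B over range(start+1, len(text)): quote candidates, backward parity test
def findCloseB (cs : List Char) (lo : Int) : List Int → Int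
  | [] => -1
  | j :: rest =>
    match PySem.List.pyGet? cs j with
    | none => -2
    | some c =>
      if c = '"' then
        if runB cs lo (j - 1) % 2 = 0 then j else findCloseB cs lo rest
      else findCloseB cs lo rest

def find_close_quote_py_alt (text : String) (start : Int) : Int :=
  findCloseB text.toList (start + 1) (PySem.List.pyRange (start + 1) text.toList.length 1)

-- ===== PRECONDITION & SPEC =====
-- Pre_ excludes exactly the inputs where Python A raises IndexError: a start so
-- negative that the first negative index start+1 wraps past the front of the string.
def Pre_find_close_quote_py (text : String) (start : Int) : Prop :=
  -(text.toList.length : Int) ≤ start + 1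
instance (text : String) (start : Int) : Decidable (Pre_find_close_quote_py text start) := by
  unfold Pre_find_close_quote_py; infer_instance

def pvWitness_find_close_quote_py : String × Int := ("\"ab\\\"c\"", 0)

def Spec_find_close_quote_py (text : String) (start : Int) (out : Int) : Prop :=
  out = find_close_quote_py_alt text start
instance (text : String) (start : Int) (out : Int) : Decidable (Spec_find_close_quote_py text start out) := by
  unfold Spec_find_close_quote_py; infer_instance

-- ===== CLAIM (what is proved, stated in full; the proofs are below) =====
def Claim_equal_find_close_quote_py : Prop := ∀ (text : String) (start : Int), Dom_find_close_quote_py text start → Pre_find_close_quote_py text start → Spec_find_close_quote_py text start (find_close_quote_py text start)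

-- ===== LEMMAS AND PROOFS =====

theorem runB_bs (cs : List Char) (lo k : Int) (h1 : lo ≤ k)
    (h2 : PySem.List.pyGet? cs k = some '\\') :
    runB cs lo k = runB cs lo (k - 1) + 1 := by
  rw [runB, dif_pos ⟨h1, h2⟩]

theorem runB_stop (cs : List Char) (lo k : Int)
    (h : ¬ (lo ≤ k ∧ PySem.List.pyGet? cs k = some '\\')) :
    runB cs lo k = 0 := by
  rw [runB, dif_neg h]

-- main invariant: while the backslash run ending just before i has even length,
-- A's stride scan from i agrees with B's candidate scan over the remaining range.
theorem findClose_eq (cs : List Char) (lo : Int) (hlo : -(cs.length : Int) ≤ lo) :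
    ∀ (m : Nat) (i : Int), ((cs.length : Int) - i).toNat ≤ m → lo ≤ i →
      runB cs lo (i - 1) % 2 = 0 →
      findCloseA cs i = findCloseB cs lo (PySem.List.pyRange i cs.length 1) := by
  intro m
  induction m with
  | zero =>
    intro i hm _ _
    rw [PySem.List.pyRange_one_eq_nil (by omega), findCloseA, dif_neg (by omega)]
    rfl
  | succ m ih =>
    intro i hm hi hrun
    by_cases hlt : i < (cs.length : Int)
    · obtain ⟨c, hc⟩ : ∃ c, PySem.List.pyGet? cs i = some c := by
        cases h : PySem.List.pyGet? cs i with
        | none =>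
          rw [PySem.List.pyGet?_eq_none_iff] at h
          exact absurd ⟨by omega, by omega⟩ h
        | some c => exact ⟨c, rfl⟩
      rw [PySem.List.pyRange_one_cons hlt, findCloseA, dif_pos hlt, hc, findCloseB, hc]
      by_cases hbs : c = '\\'
      · -- A skips to i+2; B rejects candidate i (not a quote) and steps to i+1,
        -- where the run is odd, so it also rejects/steps past i+1 whatever f(i+1) is.
        have hodd : runB cs lo i % 2 = 1 := by
          rw [runB_bs cs lo i hi (hbs ▸ hc)]; omega
        simp only [if_neg (by simp [hbs] : ¬ c = '"')]
        by_cases hlt1 : i + 1 < (cs.length : Int)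
        · obtain ⟨c', hc'⟩ : ∃ c', PySem.List.pyGet? cs (i + 1) = some c' := by
            cases h : PySem.List.pyGet? cs (i + 1) with
            | none =>
              rw [PySem.List.pyGet?_eq_none_iff] at h
              exact absurd ⟨by omega, by omega⟩ h
            | some c' => exact ⟨c', rfl⟩
          rw [PySem.List.pyRange_one_cons hlt1, findCloseB, hc']
          have hnext : runB cs lo (i + 2 - 1) % 2 = 0 := by
            by_cases hbs' : c' = '\\'
            · rw [show i + 2 - 1 = i + 1 by ring,
                runB_bs cs lo (i + 1) (by omega) (hbs' ▸ hc'),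
                show i + 1 - 1 = i by ring]
              omega
            · rw [show i + 2 - 1 = i + 1 by ring,
                runB_stop cs lo (i + 1) (by simp [hc', hbs'])]
          have hrec := ih (i + 2) (by omega) (by omega) hnext
          have hodd' : ¬ runB cs lo (i + 1 - 1) % 2 = 0 := by
            rw [show i + 1 - 1 = i by ring]; omega
          rw [show i + 1 + 1 = i + 2 by ring]
          by_cases hq' : c' = '"'
          · simp only [hbs, hq', if_true, if_neg hodd']
            exact hrec
          · simp only [hbs, if_neg hq', reduceIte]
            exact hrec
        · -- i+1 out of range: B's remaining range is empty, A's i+2 is also past the end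
          rw [PySem.List.pyRange_one_eq_nil (by omega), findCloseA, dif_neg (by omega)]
          simp [hbs, findCloseB]
      · by_cases hq : c = '"'
        · -- quote with even preceding run: both return i
          simp only [hq, if_pos hrun, if_neg (show ¬ ('"' : Char) = '\\' by decide)]
          simp
        · -- ordinary character: run ending at i is 0 (even); step to i+1
          have hnext : runB cs lo (i + 1 - 1) % 2 = 0 := by
            rw [show i + 1 - 1 = i by ring,
              runB_stop cs lo i (by simp [hc, hbs])]
          simp only [if_neg hbs, if_neg hq]
          exact ih (i + 1) (by omega) (by omega) hnext
    · rw [PySem.List.pyRange_one_eq_nil (by omega), findCloseA, dif_neg hlt]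
      rfl

-- ===== VERDICT (by name: the statement is the Claim_ definition above) =====
theorem find_close_quote_py_spec : Claim_equal_find_close_quote_py := by
  intro text start _ hpre
  unfold Spec_find_close_quote_py find_close_quote_py find_close_quote_py_alt
  refine findClose_eq text.toList (start + 1) hpre
    ((text.toList.length : Int) - (start + 1)).toNat (start + 1) le_rfl le_rfl ?_
  rw [runB_stop text.toList (start + 1) (start + 1 - 1) (by intro h; omega)]
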